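-- pv_equiv track=rewrite | github.com/parksh8009/ppp2025 | hw10/5) 최대강수량.py | get_max_rain_event_amount
-- ===== SOURCE A (Python) =====
-- def get_max_rain_event_amount(rainfalls):  # 강우 이벤트 중 최대 강수량
--     max_sum = 0
--     current_sum = 0
--
--     for rain in rainfalls:
--         if rain > 0:
--             current_sum += rain
--         else:
--             if current_sum > max_sum:
--                 max_sum = current_sum
--             current_sum = 0
--
--     if current_sum > max_sum:
--         max_sum = current_sum
--
--     return max_sum
-- ===== SOURCE B (Python) =====
-- def get_max_rain_event_amount(rainfalls):
--     # Two-phase: find maximal runs of positive values by index, sum each run, take the max.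
--     run_sums = []
--     i, n = 0, len(rainfalls)
--     while i < n:
--         if rainfalls[i] > 0:
--             j = i
--             while j < n and rainfalls[j] > 0:
--                 j += 1
--             run_sums.append(sum(rainfalls[i:j]))
--             i = j
--         else:
--             i += 1
--     return max(run_sums, default=0)
-- ===== Notes on version B (the rewrite author's own statement) =====
-- stated objective: alternative
-- what changed: Replaces A's fused single-pass max/current accumulator scan with a segment-then-reduce decomposition: first locate maximal positive runs by index, then sum each run, then take max(run_sums, default=0).
import Mathlib
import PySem

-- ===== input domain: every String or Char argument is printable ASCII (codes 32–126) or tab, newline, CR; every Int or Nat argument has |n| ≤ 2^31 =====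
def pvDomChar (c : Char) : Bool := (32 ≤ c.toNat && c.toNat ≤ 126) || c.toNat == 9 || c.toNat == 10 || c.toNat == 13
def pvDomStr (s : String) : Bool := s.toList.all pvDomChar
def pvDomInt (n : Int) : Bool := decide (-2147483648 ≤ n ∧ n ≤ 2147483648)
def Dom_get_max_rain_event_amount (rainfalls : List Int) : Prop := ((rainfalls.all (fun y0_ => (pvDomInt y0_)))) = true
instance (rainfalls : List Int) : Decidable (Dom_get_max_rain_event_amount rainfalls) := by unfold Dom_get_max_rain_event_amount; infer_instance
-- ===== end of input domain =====

-- B replaces A's fused max/current accumulator scan by a segment-then-reduce decomposition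
-- (collect maximal positive runs, sum each, take the max with default 0); return values are equal.

-- ===== PORT A =====
-- the loop body: state is (max_sum, current_sum)
def pvAStep (st : Int × Int) (rain : Int) : Int × Int :=
  if rain > 0 then (st.1, st.2 + rain)
  else (if st.2 > st.1 then st.2 else st.1, 0)

def get_max_rain_event_amount (rainfalls : List Int) : Int :=
  let st := rainfalls.foldl pvAStep (0, 0)
  if st.2 > st.1 then st.2 else st.1

-- ===== PORT B =====
-- phase 1: the maximal runs of positive values (B's outer while: skip a non-positive
-- element, or scan the run with the inner while = takeWhile/dropWhile)
def pvPosRuns : List Int → List (List Int)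
  | [] => []
  | x :: xs =>
      if x > 0 then (x :: xs.takeWhile (· > 0)) :: pvPosRuns (xs.dropWhile (· > 0))
      else pvPosRuns xs
termination_by xs => xs.length
decreasing_by
  · simpa using Nat.lt_succ_of_le (xs.length_dropWhile_le (· > 0))
  · simp

-- Python's max(run_sums, default=0)
def pvMaxD0 : List Int → Int
  | [] => 0
  | x :: xs => xs.foldl max x

def get_max_rain_event_amount_alt (rainfalls : List Int) : Int :=
  pvMaxD0 ((pvPosRuns rainfalls).map (fun r => r.foldl (· + ·) 0))

-- ===== PRECONDITION & SPEC =====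
def Spec_get_max_rain_event_amount (rainfalls : List Int) (out : Int) : Prop := out = get_max_rain_event_amount_alt rainfalls
instance (rainfalls : List Int) (out : Int) : Decidable (Spec_get_max_rain_event_amount rainfalls out) := by unfold Spec_get_max_rain_event_amount; infer_instance

-- ===== CLAIM (what is proved, stated in full; the proofs are below) =====
def Claim_equal_get_max_rain_event_amount : Prop := ∀ (rainfalls : List Int), Dom_get_max_rain_event_amount rainfalls → Spec_get_max_rain_event_amount rainfalls (get_max_rain_event_amount rainfalls)

-- ===== LEMMAS AND PROOFS =====

-- reference recursion: value of the remaining scan given the current run sum cs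
def pvR : List Int → Int → Int
  | [], cs => cs
  | x :: xs, cs => if x > 0 then pvR xs (cs + x) else max cs (pvR xs 0)

-- A's scan equals max ms (pvR xs cs), for nonnegative state
theorem pvA_eq_R (xs : List Int) : ∀ ms cs : Int, 0 ≤ ms → 0 ≤ cs →
    (let st := xs.foldl pvAStep (ms, cs); if st.2 > st.1 then st.2 else st.1)
      = max ms (pvR xs cs) := by
  induction xs with
  | nil => intro ms cs hm hc; simp [pvR]; omega
  | cons x xs ih =>
    intro ms cs hm hc
    by_cases hx : x > 0
    · simpa [pvAStep, pvR, hx] using ih ms (cs + x) hm (by omega)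
    · have := ih (if cs > ms then cs else ms) 0 (by omega) le_rfl
      simp only [List.foldl_cons, pvAStep, if_neg hx, pvR] at this ⊢
      rw [this]; omega

theorem pvR_nonneg (xs : List Int) : ∀ cs : Int, 0 ≤ cs → 0 ≤ pvR xs cs := by
  induction xs with
  | nil => intro cs h; simpa [pvR]
  | cons x xs ih =>
    intro cs h
    by_cases hx : x > 0
    · simpa [pvR, hx] using ih (cs + x) (by omega)
    · have := ih 0 le_rfl
      simp [pvR, hx]; omega

theorem pvFoldlAdd_shift (l : List Int) : ∀ a b : Int, l.foldl (· + ·) (a + b) = a + l.foldl (· + ·) b := by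
  induction l with
  | nil => intro a b; simp
  | cons z l ih =>
    intro a b
    simp only [List.foldl_cons]
    rw [show a + b + z = a + (b + z) by ring, ih]

theorem pvSum_nonneg_of_all_pos (l : List Int) (h : ∀ y ∈ l, 0 < y) : 0 ≤ l.foldl (· + ·) 0 := by
  induction l with
  | nil => simp
  | cons z l ih =>
    have hz : 0 < z := h z (by simp)
    have := ih (fun y hy => h y (by simp [hy]))
    simp only [List.foldl_cons]
    rw [show (0 : Int) + z = z + 0 by ring, pvFoldlAdd_shift l z 0]
    omega

-- consuming a run of positives just adds it to cs
theorem pvR_pos_prefix (t : List Int) : ∀ (r : List Int) (cs : Int),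
    (∀ y ∈ t, y > 0) → pvR (t ++ r) cs = pvR r (cs + t.foldl (· + ·) 0) := by
  induction t with
  | nil => intro r cs _; simp
  | cons x t ih =>
    intro r cs h
    have hx : x > 0 := h x (by simp)
    have := ih r (cs + x) (fun y hy => h y (by simp [hy]))
    simp only [List.cons_append, pvR, if_pos hx, this, List.foldl_cons]
    congr 1
    rw [show (0 : Int) + x = x + 0 by ring, pvFoldlAdd_shift t x 0]
    ring

theorem pvFoldlMax_shift (L : List Int) : ∀ a b : Int, L.foldl max (max a b) = max a (L.foldl max b) := by
  induction L with
  | nil => intro a b; simp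
  | cons x L ih =>
    intro a b
    simp only [List.foldl_cons, max_assoc, ih]

-- main bridge: the reference recursion computes B's segment-then-reduce value
theorem pvR_eq_runs (xs : List Int) :
    pvR xs 0 = ((pvPosRuns xs).map (fun r => r.foldl (· + ·) 0)).foldl max 0 := by
  induction xs using pvPosRuns.induct with
  | case1 => simp [pvR, pvPosRuns]
  | case2 x xs hx ih =>
    have ht : ∀ y ∈ xs.takeWhile (· > 0), y > 0 := fun y hy => by
      simpa using List.mem_takeWhile_imp hy
    set s := (x :: xs.takeWhile (· > 0)).foldl (· + ·) 0 with hs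
    have h1 : pvR (x :: xs) 0 = pvR (xs.dropWhile (· > 0)) (0 + s) := by
      conv_lhs => rw [show x :: xs = (x :: xs.takeWhile (· > 0)) ++ xs.dropWhile (· > 0) by
        simp [xs.takeWhile_append_dropWhile (p := (· > 0))]]
      exact pvR_pos_prefix _ _ 0 (by intro y hy; rcases List.mem_cons.1 hy with h | h
                                     · exact h ▸ hx
                                     · exact ht y h)
    rw [zero_add] at h1
    have hs0 : 0 < s := by
      rw [hs]; simp only [List.foldl_cons]
      rw [show (0 : Int) + x = x + 0 by ring, pvFoldlAdd_shift]
      have := pvSum_nonneg_of_all_pos _ (fun y hy => ht y hy)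
      omega
    cases hd : xs.dropWhile (· > 0) with
    | nil =>
      rw [pvPosRuns]; simp only [if_pos hx, hd, pvPosRuns]
      rw [h1, hd]
      simp only [pvR, List.map_cons, List.map_nil, List.foldl_cons, List.foldl_nil, ← hs]
      omega
    | cons y ys =>
      have hy : ¬ y > 0 := by
        have := xs.head_dropWhile_not (p := (· > 0)) (by simp [hd])
        simpa [hd] using this
      have ihy : pvR ys 0 = ((pvPosRuns ys).map (fun r => r.foldl (· + ·) 0)).foldl max 0 := by
        have h0 := pvR_nonneg ys 0 le_rfl
        have hih : max 0 (pvR ys 0)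
            = ((pvPosRuns ys).map (fun r => r.foldl (· + ·) 0)).foldl max 0 := by
          simpa [hd, pvPosRuns, hy, pvR] using ih
        omega
      rw [pvPosRuns]; simp only [if_pos hx]
      rw [h1, hd]
      have hrec : pvR (y :: ys) s = max s (pvR ys 0) := by simp [pvR, hy]
      rw [hrec, ihy, List.map_cons, List.foldl_cons, ← hs]
      rw [max_comm (0 : Int) s, pvFoldlMax_shift]
      rw [show pvPosRuns (y :: ys) = pvPosRuns ys from by rw [pvPosRuns]; simp [hy]]
  | case3 x xs hx ih =>
    have h0 := pvR_nonneg xs 0 le_rfl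
    rw [pvPosRuns]; simp only [if_neg hx]
    rw [← ih]
    simp [pvR, hx]; omega

-- run sums are positive, so Python's max(·, default=0) equals the 0-seeded fold
theorem pvRuns_pos (xs : List Int) : ∀ r ∈ pvPosRuns xs, 0 < r.foldl (· + ·) 0 := by
  induction xs using pvPosRuns.induct with
  | case1 => simp [pvPosRuns]
  | case2 x xs hx ih =>
    intro r hr
    rw [pvPosRuns] at hr; simp only [if_pos hx, List.mem_cons] at hr
    rcases hr with h | h
    · subst h
      have ht : ∀ y ∈ xs.takeWhile (· > 0), 0 < y := fun y hy => by
        simpa using List.mem_takeWhile_imp hy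
      have hnn := pvSum_nonneg_of_all_pos _ ht
      simp only [List.foldl_cons]
      rw [show (0 : Int) + x = x + 0 by ring, pvFoldlAdd_shift _ x 0]
      omega
    · exact ih r h
  | case3 x xs hx ih =>
    intro r hr
    rw [pvPosRuns] at hr; simp only [if_neg hx] at hr
    exact ih r hr

theorem pvMaxD0_eq_foldl (L : List Int) (h : ∀ v ∈ L, 0 < v) : pvMaxD0 L = L.foldl max 0 := by
  cases L with
  | nil => simp [pvMaxD0]
  | cons x xs =>
    have hx : 0 < x := h x (by simp)
    simp only [pvMaxD0, List.foldl_cons]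
    rw [show max 0 x = x by omega]

-- ===== VERDICT (by name: the statement is the Claim_ definition above) =====
theorem get_max_rain_event_amount_spec : Claim_equal_get_max_rain_event_amount := by
  intro xs _
  unfold Spec_get_max_rain_event_amount get_max_rain_event_amount get_max_rain_event_amount_alt
  have hA := pvA_eq_R xs 0 0 le_rfl le_rfl
  simp only at hA
  rw [hA, pvR_eq_runs]
  rw [pvMaxD0_eq_foldl _ (by intro v hv; rcases List.mem_map.1 hv with ⟨r, hr, rfl⟩; exact pvRuns_pos xs r hr)]
  have := (PySem.List.le_foldl_max ((pvPosRuns xs).map (fun r => r.foldl (· + ·) 0)) 0).1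
  omega
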